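-- pv_equiv track=rewrite | github.com/aunnnn/MLTrainer | michael/dataloader_v2.py | __load_text_chunks
-- ===== SOURCE A (Python) =====
-- def __load_text_chunks(encoded_file, chunk_size):
--     """
--     Returns a list of strings each with length of chunk_size
--     """
--     i = 0
--     text_chunks, reset_flags = [], []
--     while i < len(encoded_file):
--         line = encoded_file[i: i+chunk_size]
--         # chunk ends early with "`\n" as a signal for end of the character
--         if "`" in line and line.index('`') < chunk_size - 1:
--             text_chunks.append(encoded_file[i: i + line.index('`') + 2])
--             # signal the reset of the hidden layer at the end of the chunk training
--             # reset flags also signal the dataloader to pad 0 at the end of the sequence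
--             reset_flags.append(True)
--             i = i + line.index('`') + 2
--             continue
--         text_chunks.append(encoded_file[i:i+chunk_size])
--         reset_flags.append(False)
--         i += chunk_size
--     return text_chunks, reset_flags
-- ===== SOURCE B (Python) =====
-- def __load_text_chunks(encoded_file, chunk_size):
--     """Single left-to-right scan with a start pointer instead of re-slicing windows."""
--     chunks, flags = [], []
--     start = 0
--     j = 0
--     n = len(encoded_file)
--     while j < n:
--         if encoded_file[j] == '`' and j - start < chunk_size - 1:
--             chunks.append(encoded_file[start:j + 2])
--             flags.append(True)
--             start = j + 2
--             j = start
--         elif j - start == chunk_size - 1: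
--             chunks.append(encoded_file[start:j + 1])
--             flags.append(False)
--             start = j + 1
--             j = start
--         else:
--             j += 1
--     if start < n:
--         chunks.append(encoded_file[start:])
--         flags.append(False)
--     return chunks, flags
-- ===== Notes on version B (the rewrite author's own statement) =====
-- stated objective: alternative
-- what changed: Replaces A's windowed re-slicing with substring search ('`' in line / line.index) per chunk by a single left-to-right character scan that maintains a start pointer and the current offset, deciding split/emit at each character.
-- outside the precondition, e.g. on __load_text_chunks('ab', 0): A does not finish within the time limit, B returns (['ab'], [False])
import Mathlib
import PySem

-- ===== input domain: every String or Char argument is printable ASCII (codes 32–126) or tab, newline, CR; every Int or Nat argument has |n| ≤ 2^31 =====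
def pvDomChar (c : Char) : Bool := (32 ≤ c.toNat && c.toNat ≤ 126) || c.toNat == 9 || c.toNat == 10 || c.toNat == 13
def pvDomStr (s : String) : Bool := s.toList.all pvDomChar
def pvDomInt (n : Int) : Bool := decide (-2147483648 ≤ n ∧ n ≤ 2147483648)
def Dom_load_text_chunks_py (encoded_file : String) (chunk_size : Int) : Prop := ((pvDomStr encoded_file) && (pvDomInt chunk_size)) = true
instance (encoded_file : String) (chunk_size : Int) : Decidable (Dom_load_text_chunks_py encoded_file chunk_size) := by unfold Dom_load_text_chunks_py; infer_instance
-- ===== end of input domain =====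

-- B replaces A's windowed re-slicing/substring search by a single left-to-right scan with a
-- start pointer (objective: alternative decomposition; not measured faster in Python).

-- ===== PORT A =====
-- A's while loop over index i, written as recursion on the suffix encoded_file[i:] with a fuel
-- totality guard (fuel = string length suffices whenever chunk_size ≥ 1, i.e. on Pre_; for
-- chunk_size ≤ 0 on a nonempty string the Python loops forever).
-- Slices: encoded_file[i:i+chunk_size] = (suffix).take chunk_size.toNat, exact for every
-- chunk_size (for chunk_size ≤ 0 both are empty since the Python slice has stop ≤ start).
def loopA (k : Int) : Nat → List Char → List String × List Bool
  | _, [] => ([], [])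
  | 0, _ :: _ => ([], [])          -- fuel exhausted (unreachable on Pre_)
  | fuel + 1, c :: t =>
    let s := c :: t
    let line := s.take k.toNat                 -- line = encoded_file[i:i+chunk_size]
    match PySem.List.index? line '`' with      -- "`" in line / line.index('`')
    | some idx =>
      if (idx : Int) < k - 1 then
        let r := loopA k fuel (s.drop (idx + 2))
        (String.ofList (s.take (idx + 2)) :: r.1, true :: r.2)
      else
        let r := loopA k fuel (s.drop k.toNat)
        (String.ofList line :: r.1, false :: r.2)
    | none =>
      let r := loopA k fuel (s.drop k.toNat)
      (String.ofList line :: r.1, false :: r.2)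

def load_text_chunks_py (encoded_file : String) (chunk_size : Int) : List String × List Bool :=
  loopA chunk_size encoded_file.toList.length encoded_file.toList

-- ===== PORT B =====
-- Source B's while loop over j with start pointer: pre is the reversed current window
-- encoded_file[start:j] and the second argument is the remaining suffix encoded_file[j:].
def loopB (k : Int) : List Char → List Char → List String × List Bool
  | pre, [] =>                                 -- j = n: trailing partial window, if any
    if pre.isEmpty then ([], []) else ([String.ofList pre.reverse], [false])
  | pre, c :: rest =>
    if c = '`' ∧ (pre.length : Int) < k - 1 then
      let r := loopB k [] (rest.drop 1)        -- start = j + 2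
      (String.ofList (pre.reverse ++ c :: rest.take 1) :: r.1, true :: r.2)
    else if (pre.length : Int) = k - 1 then
      let r := loopB k [] rest                 -- start = j + 1
      (String.ofList (pre.reverse ++ [c]) :: r.1, false :: r.2)
    else loopB k (c :: pre) rest               -- j += 1
termination_by _pre rest => rest.length
decreasing_by
  · simp only [List.length_drop, List.length_cons]; omega
  · simp only [List.length_cons]; omega
  · simp only [List.length_cons]; omega

def load_text_chunks_py_alt (encoded_file : String) (chunk_size : Int) : List String × List Bool :=
  loopB chunk_size [] encoded_file.toList

-- ===== PRECONDITION & SPEC =====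
-- Pre_ excludes exactly the inputs on which A never returns: for chunk_size ≤ 0 and a nonempty
-- string, A's window is empty and i never advances, so the Python while loop runs forever.
def Pre_load_text_chunks_py (encoded_file : String) (chunk_size : Int) : Prop :=
  encoded_file = "" ∨ 1 ≤ chunk_size
instance (encoded_file : String) (chunk_size : Int) : Decidable (Pre_load_text_chunks_py encoded_file chunk_size) := by unfold Pre_load_text_chunks_py; infer_instance

def pvWitness_load_text_chunks_py : String × Int := ("ab`\ncdefg", 4)

def Spec_load_text_chunks_py (encoded_file : String) (chunk_size : Int) (out : List String × List Bool) : Prop := out = load_text_chunks_py_alt encoded_file chunk_size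
instance (encoded_file : String) (chunk_size : Int) (out : List String × List Bool) : Decidable (Spec_load_text_chunks_py encoded_file chunk_size out) := by unfold Spec_load_text_chunks_py; infer_instance

-- ===== CLAIM (what is proved, stated in full; the proofs are below) =====
def Claim_equal_load_text_chunks_py : Prop := ∀ (encoded_file : String) (chunk_size : Int), Dom_load_text_chunks_py encoded_file chunk_size → Pre_load_text_chunks_py encoded_file chunk_size → Spec_load_text_chunks_py encoded_file chunk_size (load_text_chunks_py encoded_file chunk_size)

-- ===== LEMMAS AND PROOFS =====
-- first backtick after a backtick-free prefix
lemma index?_bt (l t : List Char) (h : '`' ∉ l) :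
    PySem.List.index? (l ++ '`' :: t) '`' = some l.length :=
  (PySem.List.index?_eq_some_iff _ _ _).mpr ⟨l, t, rfl, rfl, h⟩

lemma index?_none_bt (l : List Char) (h : '`' ∉ l) :
    PySem.List.index? l '`' = none :=
  (PySem.List.index?_eq_none_iff _ _).mpr h

-- A's step on a backtick-free suffix shorter than the window: one final plain chunk
lemma loopA_nil_tail (k : Int) (pre : List Char) (fuel : Nat)
    (hnb : '`' ∉ pre) (hlen : pre.length ≤ k.toNat) (hf : 1 ≤ fuel) (hne : pre ≠ []) :
    loopA k fuel pre.reverse = ([String.ofList pre.reverse], [false]) := by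
  obtain ⟨c, t, hct⟩ := List.exists_cons_of_ne_nil (by simpa using hne : pre.reverse ≠ [])
  cases fuel with
  | zero => omega
  | succ f =>
    rw [hct]
    have hlen' : (c :: t).length ≤ k.toNat := by
      have h1 : (c :: t).length = pre.length := by rw [← hct]; simp
      omega
    simp only [loopA]
    rw [List.take_of_length_le hlen', ← hct,
        index?_none_bt _ (by simpa using hnb)]
    simp [hct, List.drop_eq_nil_of_le hlen', loopA]

lemma loop_eq (k : Int) (hk : 1 ≤ k) :
    ∀ (m : Nat) (rest pre : List Char) (fuel : Nat), rest.length ≤ m →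
      '`' ∉ pre → (pre.length : Int) ≤ k - 1 → (pre.reverse ++ rest).length ≤ fuel →
      loopA k fuel (pre.reverse ++ rest) = loopB k pre rest := by
  have hkn : (k.toNat : Int) = k := Int.toNat_of_nonneg (by omega)
  intro m
  induction m with
  | zero =>
    intro rest pre fuel hm hnb hlen hf
    have hr : rest = [] := List.eq_nil_of_length_eq_zero (by omega)
    subst hr
    simp only [List.append_nil] at hf ⊢
    rcases eq_or_ne pre [] with rfl | hne
    · cases fuel <;> simp [loopA, loopB]
    · have hlp : 0 < pre.length := List.length_pos_of_ne_nil hne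
      rw [loopA_nil_tail k pre fuel hnb (by omega) (by simp at hf; omega) hne]
      simp [loopB, hne]
  | succ m ih =>
    intro rest pre fuel hm hnb hlen hf
    cases rest with
    | nil =>
      simp only [List.append_nil] at hf ⊢
      rcases eq_or_ne pre [] with rfl | hne
      · cases fuel <;> simp [loopA, loopB]
      · have hlp : 0 < pre.length := List.length_pos_of_ne_nil hne
        rw [loopA_nil_tail k pre fuel hnb (by omega) (by simp at hf; omega) hne]
        simp [loopB, hne]
    | cons c rest' =>
      have hslen : (pre.reverse ++ c :: rest').length = pre.length + rest'.length + 1 := by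
        simp; omega
      obtain ⟨f, rfl⟩ : ∃ f, fuel = f + 1 := by
        cases fuel with
        | zero => exfalso; rw [hslen] at hf; omega
        | succ f => exact ⟨f, rfl⟩
      have hfr : pre.length + rest'.length ≤ f := by rw [hslen] at hf; omega
      have hm' : rest'.length ≤ m := by simp at hm; omega
      obtain ⟨ch, tl, hct⟩ := List.exists_cons_of_ne_nil
        (show pre.reverse ++ c :: rest' ≠ [] by simp)
      by_cases hb1 : c = '`' ∧ (pre.length : Int) < k - 1
      · obtain ⟨rfl, hlt⟩ := hb1
        have h2 : pre.length + 2 ≤ k.toNat := by omega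
        -- line and its first backtick
        have hline : (pre.reverse ++ '`' :: rest').take k.toNat
            = pre.reverse ++ '`' :: rest'.take (k.toNat - pre.length - 1) := by
          rw [List.take_append, List.take_of_length_le (by simp; omega)]
          congr 1
          rw [show k.toNat - pre.reverse.length = (k.toNat - pre.length - 1) + 1 by simp; omega]
          simp [List.take_succ_cons]
        have hidx : PySem.List.index? ((pre.reverse ++ '`' :: rest').take k.toNat) '`'
            = some pre.length := by
          rw [hline, index?_bt _ _ (by simpa using hnb)]; simp
        have hchunk : (pre.reverse ++ '`' :: rest').take (pre.length + 2)
            = pre.reverse ++ '`' :: rest'.take 1 := by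
          rw [List.take_append, List.take_of_length_le (by simp)]
          congr 1
          rw [show pre.length + 2 - pre.reverse.length = 2 by simp]
          simp [List.take_succ_cons]
        have hdrop : (pre.reverse ++ '`' :: rest').drop (pre.length + 2) = rest'.drop 1 := by
          rw [List.drop_append, List.drop_eq_nil_of_le (by simp)]
          rw [show pre.length + 2 - pre.reverse.length = 2 by simp]
          simp
        rw [hct]
        simp only [loopA]
        rw [← hct, hidx]
        simp only [hlt, if_pos]
        have hih := ih (rest'.drop 1) [] f (by simp; omega) (by simp) (by simp; omega)
          (by simp; omega)
        simp only [List.reverse_nil, List.nil_append] at hih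
        rw [hchunk, hdrop, hih]
        rw [loopB]
        simp [hlt]
      · by_cases hb2 : (pre.length : Int) = k - 1
        · have hn : pre.length + 1 = k.toNat := by omega
          have hline : (pre.reverse ++ c :: rest').take k.toNat = pre.reverse ++ [c] := by
            rw [List.take_append, List.take_of_length_le (by simp; omega)]
            congr 1
            rw [show k.toNat - pre.reverse.length = 1 by simp; omega]
            simp
          have hdrop : (pre.reverse ++ c :: rest').drop k.toNat = rest' := by
            rw [List.drop_append, List.drop_eq_nil_of_le (by simp; omega)]
            rw [show k.toNat - pre.reverse.length = 1 by simp; omega]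
            simp
          have hplain : loopA k (f + 1) (pre.reverse ++ c :: rest')
              = (String.ofList (pre.reverse ++ [c]) :: (loopA k f rest').1,
                 false :: (loopA k f rest').2) := by
            rw [hct]
            simp only [loopA]
            rw [← hct, hline]
            by_cases hc : c = '`'
            · subst hc
              rw [index?_bt _ [] (by simpa using hnb)]
              have hnlt : ¬ ((pre.reverse.length : Int) < k - 1) := by simp; omega
              simp [hdrop]
              omega
            · rw [index?_none_bt _ (by
                simp only [List.mem_append, List.mem_cons, List.not_mem_nil, or_false,
                  List.mem_reverse]
                rintro (h | h)
                · exact hnb h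
                · exact hc h.symm)]
              simp [hdrop]
          have hih := ih rest' [] f (by omega) (by simp) (by simp; omega) (by simp; omega)
          simp only [List.reverse_nil, List.nil_append] at hih
          rw [hplain, hih]
          rw [loopB]
          have hnot1 : ¬ (c = '`' ∧ (pre.length : Int) < k - 1) := by
            rintro ⟨_, h⟩; omega
          simp [hb2]
        · have hlt : (pre.length : Int) < k - 1 := lt_of_le_of_ne hlen hb2
          have hc : c ≠ '`' := fun h => hb1 ⟨h, hlt⟩
          rw [loopB]
          simp only [hb1, if_neg, not_false_iff, hb2]
          rw [List.append_cons]
          have := ih rest' (c :: pre) (f + 1) (by omega)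
            (by
              simp only [List.mem_cons]
              rintro (h | h)
              · exact hc h.symm
              · exact hnb h)
            (by simp; omega) (by simp; omega)
          simpa using this

-- ===== VERDICT (by name: the statement is the Claim_ definition above) =====
theorem load_text_chunks_py_spec : Claim_equal_load_text_chunks_py := by
  intro ef k _ hpre
  unfold Spec_load_text_chunks_py load_text_chunks_py load_text_chunks_py_alt
  rcases hpre with rfl | hk
  · simp [loopA, loopB]
  · simpa using loop_eq k hk ef.toList.length ef.toList [] ef.toList.length le_rfl
      (by simp) (by simp; omega) (by simp)
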